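-- pv_equiv track=rewrite | github.com/jack755051/charlie-ai-protocols | engine/provider_adapter.py | _strip_codex_preamble
-- ===== SOURCE A (Python) =====
-- def _strip_codex_preamble(raw: str) -> str:
--     """Strip Codex CLI banner / transcript and keep only the last assistant block.
--
--     Mirrors the awk logic in
--     ``scripts/cap-workflow-exec.sh:strip_codex_preamble`` line-for-line:
--     on each ``assistant`` or ``codex`` marker line the buffer resets so
--     only the final response block is retained, and the stripped result
--     drops the marker itself. Returns ``""`` when no marker is found so
--     the caller can fall back to the raw output (mirrors the shell's
--     ``|| printf '%s\\n' "${raw}"`` fallback).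
--     """
--     lines = raw.splitlines(keepends=True)
--     found = False
--     buf: list[str] = []
--     for line in lines:
--         stripped = line.rstrip("\n")
--         if stripped in ("assistant", "codex"):
--             found = True
--             buf = []
--             continue
--         if found:
--             buf.append(line)
--     if not found:
--         return ""
--     return "".join(buf)
-- ===== SOURCE B (Python) =====
-- def _strip_codex_preamble(raw: str) -> str:
--     """Scan backwards: collect lines until the last marker line is hit."""
--     out = []
--     for line in reversed(raw.splitlines(keepends=True)):
--         if line.rstrip("\n") in ("assistant", "codex"):
--             out.reverse()
--             return "".join(out)
--         out.append(line)
--     return ""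
-- ===== Notes on version B (the rewrite author's own statement) =====
-- stated objective: alternative
-- what changed: B replaces A's forward scan with a reset-on-marker accumulator buffer by a single backward scan that collects lines until it hits the last marker line and returns them reversed.
import Mathlib
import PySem

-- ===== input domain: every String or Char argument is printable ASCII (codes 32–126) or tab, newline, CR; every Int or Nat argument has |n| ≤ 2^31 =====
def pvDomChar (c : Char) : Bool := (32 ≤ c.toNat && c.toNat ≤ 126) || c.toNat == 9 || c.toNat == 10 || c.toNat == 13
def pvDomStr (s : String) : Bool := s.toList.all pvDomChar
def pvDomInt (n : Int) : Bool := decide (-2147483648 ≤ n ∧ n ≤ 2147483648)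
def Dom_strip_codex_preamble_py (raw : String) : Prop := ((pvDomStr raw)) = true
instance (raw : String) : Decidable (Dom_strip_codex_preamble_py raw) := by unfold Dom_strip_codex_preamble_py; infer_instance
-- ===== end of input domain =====

-- B replaces A's forward reset-on-marker buffer by a backward scan that collects lines until the last marker (alternative decomposition, same cost).

-- ===== PORT A =====
-- raw.splitlines(keepends=True); exact on the Dom_ character set (line breaks there are '\n', '\r', '\r\n')
def pvSplitKE (acc : List Char) : List Char → List (List Char)
  | [] => if acc = [] then [] else [acc.reverse]
  | '\n' :: rest => (acc.reverse ++ ['\n']) :: pvSplitKE [] rest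
  | '\r' :: '\n' :: rest => (acc.reverse ++ ['\r', '\n']) :: pvSplitKE [] rest
  | '\r' :: rest => (acc.reverse ++ ['\r']) :: pvSplitKE [] rest
  | c :: rest => pvSplitKE (c :: acc) rest

-- line.rstrip("\n"): drop trailing '\n' characters
def pvRstripNL (cs : List Char) : List Char := (cs.reverse.dropWhile (· = '\n')).reverse

-- line.rstrip("\n") in ("assistant", "codex")
def pvIsMarker (line : List Char) : Bool :=
  pvRstripNL line == "assistant".toList || pvRstripNL line == "codex".toList

-- A's loop body over the state (found, buf)
def pvStep (st : Bool × List (List Char)) (line : List Char) : Bool × List (List Char) :=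
  if pvIsMarker line then (true, [])
  else if st.1 then (st.1, st.2 ++ [line]) else st

def strip_codex_preamble_py (raw : String) : String :=
  let lines := pvSplitKE [] raw.toList
  let st := lines.foldl pvStep (false, [])
  if st.1 then String.ofList (PySem.Chars.join [] st.2) else ""

-- ===== PORT B =====
-- backward scan: append lines to out until the first marker from the end, then return out reversed and joined
def pvAltGo (out : List (List Char)) : List (List Char) → String
  | [] => ""
  | line :: rest =>
    if pvIsMarker line then String.ofList (PySem.Chars.join [] out.reverse)
    else pvAltGo (out ++ [line]) rest

def strip_codex_preamble_py_alt (raw : String) : String :=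
  pvAltGo [] (pvSplitKE [] raw.toList).reverse

-- ===== PRECONDITION & SPEC =====
def Spec_strip_codex_preamble_py (raw : String) (out : String) : Prop := out = strip_codex_preamble_py_alt raw
instance (raw : String) (out : String) : Decidable (Spec_strip_codex_preamble_py raw out) := by unfold Spec_strip_codex_preamble_py; infer_instance

-- ===== CLAIM (what is proved, stated in full; the proofs are below) =====
def Claim_equal_strip_codex_preamble_py : Prop := ∀ (raw : String), Dom_strip_codex_preamble_py raw → Spec_strip_codex_preamble_py raw (strip_codex_preamble_py raw)

-- ===== LEMMAS AND PROOFS =====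

-- B's backward scan equals A's forward fold, generalized over the lines already collected by B.
theorem pvKey (ls acc : List (List Char)) :
    pvAltGo acc ls.reverse =
      (if (ls.foldl pvStep (false, [])).1
       then String.ofList (PySem.Chars.join [] ((ls.foldl pvStep (false, [])).2 ++ acc.reverse))
       else "") := by
  induction ls using List.reverseRecOn generalizing acc with
  | nil => simp [pvAltGo]
  | append_singleton ls₀ l IH =>
    rw [List.reverse_append]
    simp only [List.reverse_singleton, List.singleton_append, List.foldl_append, List.foldl_cons,
      List.foldl_nil, pvAltGo]
    by_cases hm : pvIsMarker l
    · simp [pvStep, hm]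
    · rw [if_neg (by simp [hm]), IH]
      by_cases hf : (ls₀.foldl pvStep (false, [])).1
      · simp [pvStep, hm, hf, List.append_assoc]
      · simp [pvStep, hm, hf]

-- ===== VERDICT (by name: the statement is the Claim_ definition above) =====
theorem strip_codex_preamble_py_spec : Claim_equal_strip_codex_preamble_py := by
  intro raw _
  unfold Spec_strip_codex_preamble_py strip_codex_preamble_py strip_codex_preamble_py_alt
  rw [pvKey]
  simp
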